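-- pv_equiv track=rewrite | github.com/ramanflorfresca/antar-fastapi | antar_engine/jaimini.py | zodiac_distance_exclusive
-- ===== SOURCE A (Python) =====
-- def zodiac_distance_exclusive(start, end, direction):
--     """
--     Count number of signs traversed from start to end, NOT including start.
--     If start == end, returns 0.
--     """
--     if start == end:
--         return 0
--     dist = 0
--     current = start
--     while True:
--         current = (current + direction) % 12
--         dist += 1
--         if current == end:
--             break
--     return dist
-- ===== SOURCE B (Python) =====
-- def zodiac_distance_exclusive(start, end, direction):
--     """
--     Count number of signs traversed from start to end, NOT including start.
--     If start == end, returns 0.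
--     Closed form: the answer is the least k >= 1 with k*direction == end-start
--     (mod 12); since every unit of Z/(12/g) is its own inverse, that k is
--     ((end-start)//g * (direction//g) - 1) % (12//g) + 1 with g = gcd(direction, 12).
--     """
--     if start == end:
--         return 0
--     a, b = direction % 12, 12
--     while b:
--         a, b = b, a % b
--     g = a  # gcd(direction, 12)
--     m = 12 // g
--     return ((end - start) // g * (direction // g) - 1) % m + 1
-- ===== Notes on version B (the rewrite author's own statement) =====
-- stated objective: alternative
-- what changed: Replaces the step-by-step while-loop simulation of the 12-cycle with a number-theoretic closed form: the answer is the least k>=1 solving k*direction = end-start (mod 12), computed as ((end-start)//g * (direction//g) - 1) % (12//g) + 1 with g = gcd(direction,12) (units mod divisors of 12 are self-inverse).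
import Mathlib
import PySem

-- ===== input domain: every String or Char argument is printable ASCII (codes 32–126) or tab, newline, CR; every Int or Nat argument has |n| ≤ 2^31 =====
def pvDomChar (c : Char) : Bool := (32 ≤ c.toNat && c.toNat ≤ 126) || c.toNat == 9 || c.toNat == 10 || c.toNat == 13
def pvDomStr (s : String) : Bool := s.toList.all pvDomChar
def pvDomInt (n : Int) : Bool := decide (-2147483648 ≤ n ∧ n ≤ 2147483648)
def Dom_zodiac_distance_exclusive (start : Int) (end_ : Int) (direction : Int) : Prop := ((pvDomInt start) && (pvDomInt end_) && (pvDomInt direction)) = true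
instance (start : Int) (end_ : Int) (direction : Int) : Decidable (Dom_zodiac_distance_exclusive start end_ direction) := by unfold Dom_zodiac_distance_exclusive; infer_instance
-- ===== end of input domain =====

-- B replaces A's step-by-step walk around the 12-cycle by a closed-form solution of
-- k*direction ≡ end-start (mod 12); objective: alternative algorithm (A's loop is at most 12 steps anyway).

-- ===== PORT A =====
-- A's `while True` loop. Fuel 12 suffices on every input where the Python loop
-- terminates (after one step the state lies in [0,12), so a first hit comes within 12 steps);
-- outside Pre_ the Python loop diverges and nothing is claimed.
def zodiacLoop (fuel : Nat) (current : Int) (end_ : Int) (direction : Int) (dist : Int) : Int :=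
  match fuel with
  | 0 => dist
  | Nat.succ f =>
    if PySem.Int.mod (current + direction) 12 = end_ then dist + 1
    else zodiacLoop f (PySem.Int.mod (current + direction) 12) end_ direction (dist + 1)

def zodiac_distance_exclusive (start : Int) (end_ : Int) (direction : Int) : Int :=
  if start = end_ then 0 else zodiacLoop 12 start end_ direction 0

-- ===== PORT B =====
-- Source B's hand-written Euclid loop `while b: a, b = b, a % b`. Fuel 20 covers every
-- call the port makes (first argument in [0,12), second 12).
def euclidLoop (fuel : Nat) (a : Int) (b : Int) : Int :=
  match fuel with
  | 0 => a
  | Nat.succ f => if b = 0 then a else euclidLoop f b (PySem.Int.mod a b)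

-- the else-branch of Source B: g = gcd(direction,12); m = 12//g; ((end-start)//g*(direction//g)-1)%m+1
def altCore (start : Int) (end_ : Int) (direction : Int) : Int :=
  PySem.Int.mod
    (PySem.Int.floordiv (end_ - start) (euclidLoop 20 (PySem.Int.mod direction 12) 12)
      * PySem.Int.floordiv direction (euclidLoop 20 (PySem.Int.mod direction 12) 12) - 1)
    (PySem.Int.floordiv 12 (euclidLoop 20 (PySem.Int.mod direction 12) 12)) + 1

def zodiac_distance_exclusive_alt (start : Int) (end_ : Int) (direction : Int) : Int :=
  if start = end_ then 0 else altCore start end_ direction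

-- ===== PRECONDITION & SPEC =====
-- Pre_ = exactly the inputs on which A's while-loop terminates (A raises nothing; it
-- DIVERGES elsewhere): either start == end, or end is a reachable residue in [0,12),
-- i.e. gcd(direction,12) divides end - start.
def Pre_zodiac_distance_exclusive (start : Int) (end_ : Int) (direction : Int) : Prop :=
  start = end_ ∨ (0 ≤ end_ ∧ end_ < 12 ∧ ((Int.gcd direction 12 : Int)) ∣ (end_ - start))
instance (start : Int) (end_ : Int) (direction : Int) : Decidable (Pre_zodiac_distance_exclusive start end_ direction) := by unfold Pre_zodiac_distance_exclusive; infer_instance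
def pvWitness_zodiac_distance_exclusive : Int × Int × Int := (0, 1, 1)

def Spec_zodiac_distance_exclusive (start : Int) (end_ : Int) (direction : Int) (out : Int) : Prop := out = zodiac_distance_exclusive_alt start end_ direction
instance (start : Int) (end_ : Int) (direction : Int) (out : Int) : Decidable (Spec_zodiac_distance_exclusive start end_ direction out) := by unfold Spec_zodiac_distance_exclusive; infer_instance

-- ===== CLAIM (what is proved, stated in full; the proofs are below) =====
def Claim_equal_zodiac_distance_exclusive : Prop := ∀ (start : Int) (end_ : Int) (direction : Int), Dom_zodiac_distance_exclusive start end_ direction → Pre_zodiac_distance_exclusive start end_ direction → Spec_zodiac_distance_exclusive start end_ direction (zodiac_distance_exclusive start end_ direction)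

-- ===== LEMMAS AND PROOFS =====

-- the loop only sees direction mod 12
lemma zodiacLoop_dir (f : Nat) : ∀ (c e d dist : Int),
    zodiacLoop f c e d dist = zodiacLoop f c e (d % 12) dist := by
  induction f with
  | zero => intro c e d dist; rfl
  | succ f ih =>
    intro c e d dist
    have h : PySem.Int.mod (c + d) 12 = PySem.Int.mod (c + d % 12) 12 := by
      rw [PySem.Int.mod_eq_emod_of_pos (by norm_num),
          PySem.Int.mod_eq_emod_of_pos (by norm_num)]
      omega
    simp only [zodiacLoop, h]
    split_ifs with hc
    · rfl
    · exact ih _ _ _ _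

-- the first step only sees the start mod 12
lemma zodiacLoop_start (f : Nat) (c e d dist : Int) :
    zodiacLoop (f + 1) c e d dist = zodiacLoop (f + 1) (c % 12) e d dist := by
  have h : PySem.Int.mod (c + d) 12 = PySem.Int.mod (c % 12 + d) 12 := by
    rw [PySem.Int.mod_eq_emod_of_pos (by norm_num),
        PySem.Int.mod_eq_emod_of_pos (by norm_num)]
    omega
  simp only [zodiacLoop, h]

lemma gcd_emod12 (d : Int) : Int.gcd (d % 12) 12 = Int.gcd d 12 := by
  apply Nat.dvd_antisymm
  · have h1 : (Int.gcd (d % 12) 12 : Int) ∣ d := by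
      have hsum : d % 12 + 12 * (d / 12) = d := by omega
      calc (Int.gcd (d % 12) 12 : Int) ∣ d % 12 + 12 * (d / 12) :=
            dvd_add (Int.gcd_dvd_left _ _) (Dvd.dvd.mul_right (Int.gcd_dvd_right _ _) _)
        _ = d := hsum
    exact Int.dvd_gcd h1 (Int.gcd_dvd_right _ _)
  · have h1 : (Int.gcd d 12 : Int) ∣ d % 12 := by
      have hd : d % 12 = d - 12 * (d / 12) := by omega
      rw [hd]
      exact dvd_sub (Int.gcd_dvd_left _ _) (Dvd.dvd.mul_right (Int.gcd_dvd_right _ _) _)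
    exact Int.dvd_gcd h1 (Int.gcd_dvd_right _ _)

lemma euclid_small : ∀ r : Nat, r < 12 → euclidLoop 20 (r : Int) 12 = (Int.gcd (r : Int) 12 : Int) := by
  decide

lemma euclid_gcd (d : Int) : euclidLoop 20 (PySem.Int.mod d 12) 12 = (Int.gcd d 12 : Int) := by
  rw [PySem.Int.mod_eq_emod_of_pos (by norm_num)]
  have h0 : 0 ≤ d % 12 := Int.emod_nonneg d (by norm_num)
  have h12 : d % 12 < 12 := Int.emod_lt_of_pos d (by norm_num)
  have hcast : ((d % 12).toNat : Int) = d % 12 := Int.toNat_of_nonneg h0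
  have := euclid_small (d % 12).toNat (by omega)
  rw [hcast] at this
  rw [this, gcd_emod12]

lemma gcd12_pos (d : Int) : 0 < (Int.gcd d 12 : Int) := by
  have h : Int.gcd d 12 ≠ 0 := by
    simp [Int.gcd_eq_zero_iff]
  exact_mod_cast Nat.pos_of_ne_zero h

-- the closed form only sees start mod 12 and direction mod 12
lemma altCore_reduce (s e d : Int) (hdvd : ((Int.gcd d 12 : Int)) ∣ (e - s)) :
    altCore s e d = altCore (s % 12) e (d % 12) := by
  have hmodidem : PySem.Int.mod (d % 12) 12 = PySem.Int.mod d 12 := by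
    rw [PySem.Int.mod_eq_emod_of_pos (by norm_num),
        PySem.Int.mod_eq_emod_of_pos (by norm_num)]
    omega
  unfold altCore
  rw [hmodidem, euclid_gcd]
  set G : Int := (Int.gcd d 12 : Int) with hG
  have hGpos : 0 < G := gcd12_pos d
  have hGne : G ≠ 0 := ne_of_gt hGpos
  have hG12 : G ∣ 12 := (Int.gcd_dvd_right _ _)
  have hGd : G ∣ d := (Int.gcd_dvd_left _ _)
  have hmm : G * (12 / G) = 12 := Int.mul_ediv_cancel' hG12
  set mm : Int := 12 / G with hmmdef
  have hmmpos : 0 < mm := by nlinarith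
  simp only [PySem.Int.floordiv_eq_ediv_of_pos hGpos]
  rw [← hmmdef]
  simp only [PySem.Int.mod_eq_emod_of_pos hmmpos]
  -- quotient congruences
  have hq : s % 12 = s - 12 * (s / 12) := by omega
  have hdm : d % 12 = d - 12 * (d / 12) := by omega
  have hGs1 : G ∣ (e - s % 12) := by
    rw [hq]
    have : e - (s - 12 * (s / 12)) = (e - s) + 12 * (s / 12) := by ring
    rw [this]
    exact dvd_add hdvd (Dvd.dvd.mul_right hG12 _)
  have hGd1 : G ∣ d % 12 := by
    rw [hdm]
    exact dvd_sub hGd (Dvd.dvd.mul_right hG12 _)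
  have h1 : (e - s) / G = (e - s % 12) / G + (-(mm * (s / 12))) := by
    have harg : e - s = (e - s % 12) + G * (-(mm * (s / 12))) := by
      rw [hq]; linear_combination (s / 12) * hmm
    rw [harg, Int.add_mul_ediv_left _ _ hGne]
  have h2 : d / G = d % 12 / G + mm * (d / 12) := by
    have harg : d = d % 12 + G * (mm * (d / 12)) := by
      rw [hdm]; linear_combination (-(d / 12)) * hmm
    conv_lhs => rw [harg]
    rw [Int.add_mul_ediv_left _ _ hGne]
  rw [h1, h2]
  set u : Int := (e - s % 12) / G
  set v : Int := d % 12 / G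
  set q : Int := s / 12
  set t : Int := d / 12
  have hring : (u + -(mm * q)) * (v + mm * t) - 1
      = (u * v - 1) + mm * (u * t - q * v - mm * q * t) := by ring
  rw [hring, Int.add_mul_emod_self_left]

-- exhaustive check of the reduced problem: all residues of start, end, direction
lemma finite_core : ∀ s' : Nat, s' < 12 → ∀ e' : Nat, e' < 12 → ∀ d' : Nat, d' < 12 →
    (e' + 12 - s') % Nat.gcd d' 12 = 0 →
    zodiacLoop 12 (s' : Int) (e' : Int) (d' : Int) 0 = altCore (s' : Int) (e' : Int) (d' : Int) := by
  decide

-- ===== VERDICT (by name: the statement is the Claim_ definition above) =====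
theorem zodiac_distance_exclusive_spec : Claim_equal_zodiac_distance_exclusive := by
  intro s e d _ hpre
  unfold Spec_zodiac_distance_exclusive zodiac_distance_exclusive zodiac_distance_exclusive_alt
  by_cases hse : s = e
  · simp [hse]
  · simp only [if_neg hse]
    rcases hpre with h | ⟨he0, he12, hdvd⟩
    · exact absurd h hse
    have hs0 : 0 ≤ s % 12 := Int.emod_nonneg s (by norm_num)
    have hs12 : s % 12 < 12 := Int.emod_lt_of_pos s (by norm_num)
    have hd0 : 0 ≤ d % 12 := Int.emod_nonneg d (by norm_num)
    have hd12 : d % 12 < 12 := Int.emod_lt_of_pos d (by norm_num)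
    -- reduce both sides to the residues
    have hA : zodiacLoop 12 s e d 0 = zodiacLoop 12 (s % 12) e (d % 12) 0 := by
      rw [zodiacLoop_dir, zodiacLoop_start 11]
    have hB : altCore s e d = altCore (s % 12) e (d % 12) := altCore_reduce s e d hdvd
    rw [hA, hB]
    -- cast to Nat residues and finish with the exhaustive check
    have hscast : (((s % 12).toNat : Nat) : Int) = s % 12 := Int.toNat_of_nonneg hs0
    have hecast : ((e.toNat : Nat) : Int) = e := Int.toNat_of_nonneg he0
    have hdcast : (((d % 12).toNat : Nat) : Int) = d % 12 := Int.toNat_of_nonneg hd0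
    -- divisibility condition in Nat form
    have hgg : (Nat.gcd (d % 12).toNat 12) = Int.gcd d 12 := by
      rw [← gcd_emod12 d]
      unfold Int.gcd
      congr 1
      · omega
    have hGpos : 0 < Nat.gcd (d % 12).toNat 12 := by rw [hgg]; exact_mod_cast gcd12_pos d
    have hGs1 : ((Int.gcd d 12 : Int)) ∣ (e - s % 12) := by
      have hq : s % 12 = s - 12 * (s / 12) := by omega
      have : e - s % 12 = (e - s) + 12 * (s / 12) := by rw [hq]; ring
      rw [this]
      exact dvd_add hdvd (Dvd.dvd.mul_right (Int.gcd_dvd_right _ _) _)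
    have hdvdN : (Nat.gcd (d % 12).toNat 12) ∣ (e.toNat + 12 - (s % 12).toNat) := by
      have hint : ((Int.gcd d 12 : Int)) ∣ ((e.toNat + 12 - (s % 12).toNat : Nat) : Int) := by
        have hcast2 : ((e.toNat + 12 - (s % 12).toNat : Nat) : Int) = (e - s % 12) + 12 := by
          omega
        rw [hcast2]
        exact dvd_add hGs1 (Int.gcd_dvd_right _ _)
      rw [← hgg] at hint
      exact_mod_cast hint
    have hcond : (e.toNat + 12 - (s % 12).toNat) % Nat.gcd (d % 12).toNat 12 = 0 :=
      Nat.mod_eq_zero_of_dvd hdvdN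
    have := finite_core (s % 12).toNat (by omega) e.toNat (by omega) (d % 12).toNat (by omega) hcond
    rw [hscast, hecast, hdcast] at this
    exact this
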